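-- pv_equiv track=rewrite | github.com/xt3jas/Fresnel | stats.py | pronouns
-- ===== SOURCE A (Python) =====
-- def pronouns(words):
--     first_person = {"i", "me", "my", "mine", "myself"}
--     collective = {"we", "us", "our", "ours", "ourselves"}
--     second_person = {"you", "your", "yours"}
--     counts = {"I/Me": 0, "We/Us": 0, "You": 0}
--     for w in words:
--         if w in first_person:
--             counts["I/Me"] += 1
--         elif w in collective:
--             counts["We/Us"] += 1
--         elif w in second_person:
--             counts["You"] += 1
--     return counts
-- ===== SOURCE B (Python) =====
-- def pronouns(words):
--     groups = [("I/Me", ["i", "me", "my", "mine", "myself"]),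
--               ("We/Us", ["we", "us", "our", "ours", "ourselves"]),
--               ("You", ["you", "your", "yours"])]
--     return {name: sum(words.count(p) for p in ps) for name, ps in groups}
-- ===== Notes on version B (the rewrite author's own statement) =====
-- stated objective: alternative
-- what changed: instead of classifying each word once through an if/elif chain over three sets, B never classifies words at all: it makes a per-pronoun counting pass (words.count) and sums the 13 multiplicities group by group in a dict comprehension
import Mathlib
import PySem

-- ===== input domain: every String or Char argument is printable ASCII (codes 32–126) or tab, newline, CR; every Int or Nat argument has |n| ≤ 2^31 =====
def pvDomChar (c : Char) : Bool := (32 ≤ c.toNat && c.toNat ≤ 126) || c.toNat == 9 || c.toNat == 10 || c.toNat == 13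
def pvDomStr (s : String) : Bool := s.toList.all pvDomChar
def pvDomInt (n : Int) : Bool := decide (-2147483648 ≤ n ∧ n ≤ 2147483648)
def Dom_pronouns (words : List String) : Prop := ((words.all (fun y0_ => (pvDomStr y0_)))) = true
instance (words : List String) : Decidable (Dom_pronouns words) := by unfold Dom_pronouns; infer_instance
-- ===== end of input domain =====

-- B replaces A's per-word if/elif classification loop by per-pronoun counting passes
-- (words.count for each of the 13 pronouns, summed group by group); return value only.

-- ===== PORT A =====
-- the three pronoun sets of A (Python set of distinct literals → list of distinct elements)
def pvFirstPerson : List String := ["i", "me", "my", "mine", "myself"]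
def pvCollective : List String := ["we", "us", "our", "ours", "ourselves"]
def pvSecondPerson : List String := ["you", "your", "yours"]

-- loop body of A: membership chain over the three sets, incrementing one dict entry
def pvStepA (d : PySem.Dict String Int) (w : String) : PySem.Dict String Int :=
  if pvFirstPerson.contains w then d.modify "I/Me" 0 (· + 1)
  else if pvCollective.contains w then d.modify "We/Us" 0 (· + 1)
  else if pvSecondPerson.contains w then d.modify "You" 0 (· + 1)
  else d

def pronouns (words : List String) : List (String × Int) :=
  (words.foldl pvStepA (PySem.Dict.ofList [("I/Me", 0), ("We/Us", 0), ("You", 0)])).items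

-- ===== PORT B =====
-- B's groups table: category name paired with its pronoun list
def pvGroups : List (String × List String) :=
  [("I/Me", ["i", "me", "my", "mine", "myself"]),
   ("We/Us", ["we", "us", "our", "ours", "ourselves"]),
   ("You", ["you", "your", "yours"])]

-- sum(words.count(p) for p in ps)
def pvGroupSum (words : List String) (ps : List String) : Int :=
  (ps.map (fun p => (PySem.List.count words p : Int))).sum

-- the dict comprehension {name: sum(...) for name, ps in groups}
def pronouns_alt (words : List String) : List (String × Int) :=
  (PySem.Dict.ofList (pvGroups.map (fun g => (g.1, pvGroupSum words g.2)))).items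

-- ===== PRECONDITION & SPEC =====
def Spec_pronouns (words : List String) (out : List (String × Int)) : Prop := out = pronouns_alt words
instance (words : List String) (out : List (String × Int)) : Decidable (Spec_pronouns words out) := by unfold Spec_pronouns; infer_instance

-- ===== CLAIM =====
def Claim_equal_pronouns : Prop := ∀ (words : List String), Dom_pronouns words → Spec_pronouns words (pronouns words)

-- ===== LEMMAS AND PROOFS =====
-- group sums over a cons: the new word adds its multiplicity in the group
theorem pvGroupSum_cons (ws : List String) (w : String) (g : List String) :
    pvGroupSum (w :: ws) g = (g.count w : Int) + pvGroupSum ws g := by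
  induction g with
  | nil => simp [pvGroupSum]
  | cons p g ih =>
    simp only [pvGroupSum, List.map_cons, List.sum_cons] at *
    rw [ih, PySem.List.count_eq, PySem.List.count_eq, List.count_cons, List.count_cons]
    by_cases hpw : p = w
    · subst hpw; simp; ring
    · have h1 : (p == w) = false := by simp [hpw]
      have h2 : (w == p) = false := by simp [Ne.symm hpw]
      simp [h1, h2]; ring

-- A's step on a word of the first-person set
theorem pvStepA_fp (w : String) (h : w ∈ pvFirstPerson) (a b c : Int) :
    pvStepA (PySem.Dict.mk [("I/Me", a), ("We/Us", b), ("You", c)]) w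
      = PySem.Dict.mk [("I/Me", a + 1), ("We/Us", b), ("You", c)] := by
  fin_cases h <;>
    simp [pvStepA, pvFirstPerson,
      PySem.Dict.modify, PySem.Dict.contains, PySem.Dict.insert, PySem.Dict.get?,
      PySem.Dict.getD, List.find?]

-- A's step on a word of the collective set
theorem pvStepA_co (w : String) (h : w ∈ pvCollective) (a b c : Int) :
    pvStepA (PySem.Dict.mk [("I/Me", a), ("We/Us", b), ("You", c)]) w
      = PySem.Dict.mk [("I/Me", a), ("We/Us", b + 1), ("You", c)] := by
  fin_cases h <;>
    simp [pvStepA, pvFirstPerson, pvCollective,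
      PySem.Dict.modify, PySem.Dict.contains, PySem.Dict.insert, PySem.Dict.get?,
      PySem.Dict.getD, List.find?]

-- A's step on a word of the second-person set
theorem pvStepA_sp (w : String) (h : w ∈ pvSecondPerson) (a b c : Int) :
    pvStepA (PySem.Dict.mk [("I/Me", a), ("We/Us", b), ("You", c)]) w
      = PySem.Dict.mk [("I/Me", a), ("We/Us", b), ("You", c + 1)] := by
  fin_cases h <;>
    simp [pvStepA, pvFirstPerson, pvCollective, pvSecondPerson,
      PySem.Dict.modify, PySem.Dict.contains, PySem.Dict.insert, PySem.Dict.get?,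
      PySem.Dict.getD, List.find?]

-- A's step on a non-pronoun
theorem pvStepA_none (w : String) (h1 : w ∉ pvFirstPerson) (h2 : w ∉ pvCollective)
    (h3 : w ∉ pvSecondPerson) (d : PySem.Dict String Int) : pvStepA d w = d := by
  simp [pvStepA, h1, h2, h3]

-- membership in each literal group pins the counts in all three
theorem pvCounts_fp (w : String) (h : w ∈ pvFirstPerson) :
    pvFirstPerson.count w = 1 ∧ pvCollective.count w = 0 ∧ pvSecondPerson.count w = 0 := by
  fin_cases h <;> decide

theorem pvCounts_co (w : String) (h : w ∈ pvCollective) :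
    pvFirstPerson.count w = 0 ∧ pvCollective.count w = 1 ∧ pvSecondPerson.count w = 0 := by
  fin_cases h <;> decide

theorem pvCounts_sp (w : String) (h : w ∈ pvSecondPerson) :
    pvFirstPerson.count w = 0 ∧ pvCollective.count w = 0 ∧ pvSecondPerson.count w = 1 := by
  fin_cases h <;> decide

-- the loop invariant of A, phrased against B's group sums
theorem pvFold_eq (ws : List String) (a b c : Int) :
    ws.foldl pvStepA (PySem.Dict.mk [("I/Me", a), ("We/Us", b), ("You", c)])
      = PySem.Dict.mk [("I/Me", a + pvGroupSum ws pvFirstPerson),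
          ("We/Us", b + pvGroupSum ws pvCollective),
          ("You", c + pvGroupSum ws pvSecondPerson)] := by
  induction ws generalizing a b c with
  | nil => simp [pvGroupSum, pvFirstPerson, pvCollective, pvSecondPerson, PySem.List.count_eq]
  | cons w ws ih =>
    simp only [List.foldl_cons]
    rw [pvGroupSum_cons, pvGroupSum_cons, pvGroupSum_cons]
    by_cases h1 : w ∈ pvFirstPerson
    · obtain ⟨c1, c2, c3⟩ := pvCounts_fp w h1
      rw [pvStepA_fp w h1, ih, c1, c2, c3]
      norm_num [add_assoc]
    · by_cases h2 : w ∈ pvCollective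
      · obtain ⟨c1, c2, c3⟩ := pvCounts_co w h2
        rw [pvStepA_co w h2, ih, c1, c2, c3]
        norm_num [add_assoc]
      · by_cases h3 : w ∈ pvSecondPerson
        · obtain ⟨c1, c2, c3⟩ := pvCounts_sp w h3
          rw [pvStepA_sp w h3, ih, c1, c2, c3]
          norm_num [add_assoc]
        · have c1 : pvFirstPerson.count w = 0 := List.count_eq_zero.mpr h1
          have c2 : pvCollective.count w = 0 := List.count_eq_zero.mpr h2
          have c3 : pvSecondPerson.count w = 0 := List.count_eq_zero.mpr h3
          rw [pvStepA_none w h1 h2 h3, ih, c1, c2, c3]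
          norm_num

-- ===== VERDICT =====
theorem pronouns_spec : Claim_equal_pronouns := by
  intro words _
  show pronouns words = pronouns_alt words
  unfold pronouns pronouns_alt
  have h0 : PySem.Dict.ofList [(("I/Me" : String), (0 : Int)), ("We/Us", 0), ("You", 0)]
      = PySem.Dict.mk [("I/Me", 0), ("We/Us", 0), ("You", 0)] := rfl
  rw [h0, pvFold_eq]
  have hB : PySem.Dict.ofList (pvGroups.map (fun g => (g.1, pvGroupSum words g.2)))
      = PySem.Dict.mk [("I/Me", pvGroupSum words pvFirstPerson),
          ("We/Us", pvGroupSum words pvCollective),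
          ("You", pvGroupSum words pvSecondPerson)] := rfl
  rw [hB]
  norm_num
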